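-- pv_equiv track=rewrite | github.com/JeffVu-1/CP104 | vuxx8539_l08/functions.py | list_categorize
-- ===== SOURCE A (Python) =====
-- def list_categorize(values):
--     """
--     -------------------------------------------------------
--     Returns data about the categories of values in a list.
--     Use: negatives, positives, zeroes, evens, odds = list_categorize(values)
--     -------------------------------------------------------
--     Parameters:
--         values - a list of values (list of int)
--     Returns:
--         negatives - the number of negative values (int)
--         positives - the number of positive values (int)
--         zeroes - the number of zeroes (int)
--         evens - the number of even values (int)
--         odds - the number of odd values (int)
--     -------------------------------------------------------
--     """
--     negatives = 0
--     zeroes = 0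
--     positives = 0
--     evens = 0
--     odds = 0
--
--     for v in values:
--         if v < 0:
--             negatives += 1
--         elif v > 0:
--             positives += 1
--         else:
--             zeroes += 1
--         if v % 2 == 0:
--             evens += 1
--         else:
--             odds += 1
--     return negatives, positives, zeroes, evens, odds
-- ===== SOURCE B (Python) =====
-- def list_categorize(values):
--     negatives = sum(1 for v in values if v < 0)
--     positives = sum(1 for v in values if v > 0)
--     evens = sum(1 for v in values if v % 2 == 0)
--     n = len(values)
--     return negatives, positives, n - negatives - positives, evens, n - evens
-- ===== Notes on version B (the rewrite author's own statement) =====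
-- stated objective: alternative
-- what changed: Replaces the single branching accumulator loop with three independent filter-count passes (negatives, positives, evens) and derives zeroes and odds arithmetically from the list length.
import Mathlib
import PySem

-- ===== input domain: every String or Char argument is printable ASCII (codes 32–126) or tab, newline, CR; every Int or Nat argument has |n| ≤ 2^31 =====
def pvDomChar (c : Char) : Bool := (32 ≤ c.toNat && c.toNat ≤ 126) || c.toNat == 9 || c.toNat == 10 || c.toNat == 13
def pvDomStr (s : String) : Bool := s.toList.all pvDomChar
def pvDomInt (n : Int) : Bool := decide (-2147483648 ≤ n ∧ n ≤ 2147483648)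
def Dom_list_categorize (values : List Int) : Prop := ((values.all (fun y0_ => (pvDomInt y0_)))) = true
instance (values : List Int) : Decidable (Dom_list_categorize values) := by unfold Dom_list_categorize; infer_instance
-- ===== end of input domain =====

-- B replaces A's single branching accumulator loop by three independent filter-count
-- passes plus arithmetic derivation of zeroes and odds (objective: alternative decomposition).

-- ===== PORT A =====
-- one loop step of A: state (negatives, positives, zeroes, evens, odds)
def pvStepA (st : Int × Int × Int × Int × Int) (v : Int) : Int × Int × Int × Int × Int :=
  let (neg, pos, zer, ev, od) := st
  let (neg, pos, zer) :=
    if v < 0 then (neg + 1, pos, zer)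
    else if v > 0 then (neg, pos + 1, zer)
    else (neg, pos, zer + 1)
  if PySem.Int.mod v 2 == 0 then (neg, pos, zer, ev + 1, od)
  else (neg, pos, zer, ev, od + 1)

def list_categorize (values : List Int) : Int × Int × Int × Int × Int :=
  values.foldl pvStepA (0, 0, 0, 0, 0)

-- ===== PORT B =====
def list_categorize_alt (values : List Int) : Int × Int × Int × Int × Int :=
  let negatives : Int := ((values.filter (fun v => v < 0)).length : Int)
  let positives : Int := ((values.filter (fun v => v > 0)).length : Int)
  let evens : Int := ((values.filter (fun v => PySem.Int.mod v 2 == 0)).length : Int)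
  let n : Int := (values.length : Int)
  (negatives, positives, n - negatives - positives, evens, n - evens)

-- ===== PRECONDITION & SPEC =====
def Spec_list_categorize (values : List Int) (out : Int × Int × Int × Int × Int) : Prop := out = list_categorize_alt values
instance (values : List Int) (out : Int × Int × Int × Int × Int) : Decidable (Spec_list_categorize values out) := by unfold Spec_list_categorize; infer_instance

-- ===== CLAIM (what is proved, stated in full; the proofs are below) =====
def Claim_equal_list_categorize : Prop := ∀ (values : List Int), Dom_list_categorize values → Spec_list_categorize values (list_categorize values)

-- ===== LEMMAS AND PROOFS =====
theorem pvFoldA_inv (values : List Int) : ∀ (n p z e o : Int),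
    values.foldl pvStepA (n, p, z, e, o) =
      (n + ((values.filter (fun v => v < 0)).length : Int),
       p + ((values.filter (fun v => v > 0)).length : Int),
       z + ((values.length : Int)
            - ((values.filter (fun v => v < 0)).length : Int)
            - ((values.filter (fun v => v > 0)).length : Int)),
       e + ((values.filter (fun v => PySem.Int.mod v 2 == 0)).length : Int),
       o + ((values.length : Int)
            - ((values.filter (fun v => PySem.Int.mod v 2 == 0)).length : Int))) := by
  induction values with
  | nil => intro n p z e o; simp
  | cons v vs ih =>
    intro n p z e o
    rw [List.foldl_cons]
    simp only [List.filter_cons, List.length_cons, pvStepA]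
    split_ifs <;>
      (simp only [ih, List.length_cons, Prod.mk.injEq, decide_eq_true_eq] at *; push_cast; and_intros <;> first | trivial | omega)

-- ===== VERDICT (by name: the statement is the Claim_ definition above) =====
theorem list_categorize_spec : Claim_equal_list_categorize := by
  intro values _
  unfold Spec_list_categorize list_categorize list_categorize_alt
  rw [pvFoldA_inv]
  simp
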